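-- pv_equiv track=rewrite | github.com/miliar/Code_Jam_Webscraper | solutions_python/Problem_126/577.py | check
-- ===== SOURCE A (Python) =====
-- def check(L,n):
-- 	count=0
-- 	x=['a','e','i','o','u']
-- 	for l in L:
-- 		if len(l)>=n:
-- 			l=l.replace('e','a')
-- 			l=l.replace('i','a')
-- 			l=l.replace('o','a')
-- 			l=l.replace('u','a')
-- 			A=l.split('a')
-- 			for a in A:
-- 				if len(a)>=n:
-- 					count=count+1
-- 					break
-- 	return count
-- ===== SOURCE B (Python) =====
-- def check(L, n):
--     count = 0
--     for w in L:
--         best = run = 0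
--         for ch in w:
--             run = 0 if ch in 'aeiou' else run + 1
--             if run > best:
--                 best = run
--         if best >= n:
--             count += 1
--     return count
-- ===== Notes on version B (the rewrite author's own statement) =====
-- stated objective: simpler
-- what changed: Replaces A's vowel-masking (four replace passes) + split-into-tokens + token-length scan with a single left-to-right pass per word that computes the longest consecutive-consonant run and compares it to n once.
import Mathlib
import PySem

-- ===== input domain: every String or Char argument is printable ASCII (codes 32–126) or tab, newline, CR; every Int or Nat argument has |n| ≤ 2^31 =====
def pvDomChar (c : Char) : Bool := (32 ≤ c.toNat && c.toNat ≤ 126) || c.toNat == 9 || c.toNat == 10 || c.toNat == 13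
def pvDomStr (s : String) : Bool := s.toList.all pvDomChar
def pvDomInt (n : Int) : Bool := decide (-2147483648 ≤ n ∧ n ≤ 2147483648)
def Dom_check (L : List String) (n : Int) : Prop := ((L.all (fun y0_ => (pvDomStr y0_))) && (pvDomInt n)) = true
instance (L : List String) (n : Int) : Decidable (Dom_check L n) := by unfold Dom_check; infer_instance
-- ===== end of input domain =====

-- B replaces A's four vowel-masking replace passes + split + token-length scan by a single
-- per-word pass that computes the longest consecutive-consonant run (objective: simpler).

-- ===== PORT A =====
-- inner 'for a in A: if len(a)>=n: count+=1; break'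
def checkInner (A : List String) (n : Int) (count : Int) : Int :=
  match A with
  | [] => count
  | a :: rest => if n ≤ PySem.Str.len a then count + 1 else checkInner rest n count

def check (L : List String) (n : Int) : Int :=
  L.foldl (fun count l =>
    if n ≤ PySem.Str.len l then
      let l1 := PySem.Str.replace l "e" "a"
      let l2 := PySem.Str.replace l1 "i" "a"
      let l3 := PySem.Str.replace l2 "o" "a"
      let l4 := PySem.Str.replace l3 "u" "a"
      -- l4.split('a'): sep is the nonempty literal "a", so split? is always some
      let A := (PySem.Str.split? l4 "a").getD []
      checkInner A n count
    else count) 0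

-- ===== PORT B =====
-- inner loop of Source B: longest run of consecutive consonants, reset on vowels
def bestRun (cs : List Char) (run best : Int) : Int :=
  match cs with
  | [] => best
  | c :: rest =>
    let run' := if c ∈ ['a', 'e', 'i', 'o', 'u'] then 0 else run + 1
    let best' := if best < run' then run' else best
    bestRun rest run' best'

def check_alt (L : List String) (n : Int) : Int :=
  L.foldl (fun count w =>
    if n ≤ bestRun w.toList 0 0 then count + 1 else count) 0

-- ===== PRECONDITION & SPEC =====
def Spec_check (L : List String) (n : Int) (out : Int) : Prop := out = check_alt L n
instance (L : List String) (n : Int) (out : Int) : Decidable (Spec_check L n out) := by unfold Spec_check; infer_instance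

-- ===== CLAIM (what is proved, stated in full; the proofs are below) =====
def Claim_equal_check : Prop := ∀ (L : List String) (n : Int), Dom_check L n → Spec_check L n (check L n)

-- ===== LEMMAS AND PROOFS =====

-- proof-side helper: early-exit scan 'some consonant run reaches n' over the raw word
def bScan (cs : List Char) (n : Int) (run : Int) : Bool :=
  match cs with
  | [] => false
  | c :: rest =>
    let run' := if c ∈ ['a', 'e', 'i', 'o', 'u'] then 0 else run + 1
    if n ≤ run' then true else bScan rest n run'

-- the character A's four-fold masking sends every character to
def pvMask (c : Char) : Char :=
  if c = 'e' then 'a' else if c = 'i' then 'a' else if c = 'o' then 'a' else if c = 'u' then 'a' else c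

-- pure recursive form of splitting a char list on the single separator 'a'
def pvSplitA (cur : List Char) : List Char → List (List Char)
  | [] => [cur.reverse]
  | c :: rest => if c = 'a' then cur.reverse :: pvSplitA [] rest else pvSplitA (c :: cur) rest

-- bScan specialised to a masked list, where the vowel test degenerates to c = 'a'
def pvScanA (l : List Char) (n : Int) (run : Int) : Bool :=
  match l with
  | [] => false
  | c :: rest =>
    let run' := if c = 'a' then 0 else run + 1
    if n ≤ run' then true else pvScanA rest n run'

theorem pv_replace_go (x y : Char) : ∀ (fuel : Nat) (l acc : List Char), l.length ≤ fuel →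
    PySem.Chars.replace.go [x] [y] fuel l acc = acc.reverse ++ l.map (fun c => if c = x then y else c) := by
  intro fuel
  induction fuel with
  | zero =>
    intro l acc h
    have : l = [] := List.length_eq_zero_iff.mp (Nat.le_zero.mp h)
    subst this; simp [PySem.Chars.replace.go]
  | succ fuel ih =>
    intro l acc h
    cases l with
    | nil => simp [PySem.Chars.replace.go]
    | cons c t =>
      simp only [PySem.Chars.replace.go, List.isPrefixOf]
      by_cases hc : c = x
      · simp [hc, ih t _ (by simpa using h)]
      · have hx : (x == c) = false := by simp [Ne.symm hc]
        simp [hx, hc, ih t _ (by simpa using h)]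

theorem pv_replace_single (x y : Char) (cs : List Char) :
    PySem.Chars.replace cs [x] [y] = cs.map (fun c => if c = x then y else c) := by
  simp [PySem.Chars.replace, pv_replace_go x y cs.length cs [] le_rfl]

theorem pv_splitOn_go : ∀ (fuel : Nat) (l cur : List Char) (acc : List (List Char)), l.length ≤ fuel →
    PySem.Chars.splitOn.go ['a'] fuel l cur acc = acc.reverse ++ pvSplitA cur l := by
  intro fuel
  induction fuel with
  | zero =>
    intro l cur acc h
    have : l = [] := List.length_eq_zero_iff.mp (Nat.le_zero.mp h)
    subst this; simp [PySem.Chars.splitOn.go, pvSplitA]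
  | succ fuel ih =>
    intro l cur acc h
    cases l with
    | nil => simp [PySem.Chars.splitOn.go, pvSplitA]
    | cons c rest =>
      simp only [PySem.Chars.splitOn.go, List.isPrefixOf]
      by_cases hc : c = 'a'
      · have hx : ('a' == c) = true := by simp [hc]
        simp [hx, hc, ih rest _ _ (by simpa using h), pvSplitA]
      · have hx : ('a' == c) = false := by simp [Ne.symm hc]
        simp [hx, ih rest _ _ (by simpa using h), pvSplitA, hc]

theorem pv_splitOn_eq (cs : List Char) :
    PySem.Chars.splitOn cs ['a'] = pvSplitA [] cs := by
  simp [PySem.Chars.splitOn, pv_splitOn_go (cs.length + 1) cs [] [] (by omega)]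

theorem pv_mask_a (c : Char) : (pvMask c = 'a') ↔ c ∈ ['a', 'e', 'i', 'o', 'u'] := by
  simp only [pvMask, List.mem_cons]
  split_ifs with h1 h2 h3 h4 <;> simp_all

theorem pv_scan_mask (cs : List Char) (n : Int) : ∀ run,
    pvScanA (cs.map pvMask) n run = bScan cs n run := by
  induction cs with
  | nil => intro run; rfl
  | cons c rest ih =>
    intro run
    simp only [List.map_cons, pvScanA, bScan]
    by_cases hv : c ∈ ['a', 'e', 'i', 'o', 'u']
    · simp [hv, (pv_mask_a c).mpr hv, ih]
    · simp [hv, (pv_mask_a c).not.mpr hv, ih]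

theorem pv_scan_bound (l : List Char) (n : Int) : ∀ run, 0 ≤ run → pvScanA l n run = true →
    n ≤ run + l.length := by
  induction l with
  | nil => intro run _ h; simp [pvScanA] at h
  | cons c rest ih =>
    intro run hrun h
    simp only [pvScanA] at h
    split_ifs at h with hc hn hn
    · simp only [List.length_cons]; push_cast; omega
    · have := ih 0 le_rfl h; simp only [List.length_cons]; push_cast at this ⊢; omega
    · simp only [List.length_cons]; push_cast; omega
    · have := ih (run + 1) (by omega) h; simp only [List.length_cons]; push_cast at this ⊢; omega

theorem pv_tokens_iff (n : Int) (hn : 1 ≤ n) : ∀ (l cur : List Char),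
    (∃ t ∈ pvSplitA cur l, n ≤ (t.length : Int)) ↔
      (n ≤ (cur.length : Int) ∨ pvScanA l n cur.length = true) := by
  intro l
  induction l with
  | nil => intro cur; simp [pvSplitA, pvScanA]
  | cons c rest ih =>
    intro cur
    by_cases hc : c = 'a'
    · subst hc
      have h0 : ¬ n ≤ (0 : Int) := by omega
      show (∃ t ∈ cur.reverse :: pvSplitA [] rest, n ≤ (t.length : Int)) ↔ _
      simp only [pvScanA, if_true]
      rw [if_neg h0]
      simp only [List.mem_cons]
      constructor
      · rintro ⟨t, ht, hlen⟩
        rcases ht with rfl | ht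
        · left; simpa using hlen
        · rcases (ih []).mp ⟨t, ht, hlen⟩ with h | h
          · norm_num at h; omega
          · right; simpa using h
      · rintro (h | h)
        · exact ⟨cur.reverse, Or.inl rfl, by simpa using h⟩
        · rcases (ih []).mpr (Or.inr (by simpa using h)) with ⟨t, ht, hlen⟩
          exact ⟨t, Or.inr ht, hlen⟩
    · simp only [pvSplitA, if_neg hc, pvScanA, if_neg hc]
      rw [ih (c :: cur)]
      simp only [List.length_cons]
      by_cases hle : n ≤ (cur.length : Int) + 1
      · constructor
        · intro _; right; simp only [if_pos (by push_cast; omega : n ≤ (cur.length : Int) + 1)]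
        · intro _; left; push_cast; omega
      · have : ¬ n ≤ (cur.length : Int) := by omega
        simp only [if_neg (by push_cast; omega : ¬ n ≤ (cur.length : Int) + 1)]
        push_cast
        constructor
        · rintro (h | h)
          · omega
          · tauto
        · rintro (h | h)
          · omega
          · tauto

theorem pv_mask_comp (c : Char) :
    (if (if (if (if c = 'e' then 'a' else c) = 'i' then 'a' else (if c = 'e' then 'a' else c)) = 'o'
        then 'a' else (if (if c = 'e' then 'a' else c) = 'i' then 'a' else (if c = 'e' then 'a' else c))) = 'u'
      then 'a'
      else (if (if (if c = 'e' then 'a' else c) = 'i' then 'a' else (if c = 'e' then 'a' else c)) = 'o'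
        then 'a' else (if (if c = 'e' then 'a' else c) = 'i' then 'a' else (if c = 'e' then 'a' else c))))
    = pvMask c := by
  simp only [pvMask]
  split_ifs <;> simp_all

theorem pv_splitA_ne_nil (l : List Char) : ∀ cur, pvSplitA cur l ≠ [] := by
  induction l with
  | nil => intro cur; simp [pvSplitA]
  | cons c rest ih =>
    intro cur
    simp only [pvSplitA]
    split_ifs
    · simp
    · exact ih _

theorem pv_checkInner (A : List String) (n : Int) : ∀ count,
    checkInner A n count = if ∃ a ∈ A, n ≤ PySem.Str.len a then count + 1 else count := by
  induction A with
  | nil => intro count; simp [checkInner]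
  | cons a rest ih =>
    intro count
    simp only [checkInner]
    by_cases ha : n ≤ PySem.Str.len a
    · rw [if_pos ha, if_pos ⟨a, List.mem_cons_self, ha⟩]
    · rw [if_neg ha, ih]
      have hiff : (∃ x ∈ a :: rest, n ≤ PySem.Str.len x) ↔ (∃ x ∈ rest, n ≤ PySem.Str.len x) := by
        simp only [List.mem_cons]
        constructor
        · rintro ⟨x, hx | hx, h⟩
          · exact absurd (hx ▸ h) ha
          · exact ⟨x, hx, h⟩
        · rintro ⟨x, hx, h⟩
          exact ⟨x, Or.inr hx, h⟩
      rw [if_congr hiff rfl rfl]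

-- the running best never decreases
theorem pv_best_mono (cs : List Char) : ∀ run best : Int, best ≤ bestRun cs run best := by
  induction cs with
  | nil => intro run best; simp [bestRun]
  | cons c rest ih =>
    intro run best
    simp only [bestRun]
    set run' := if c ∈ ['a', 'e', 'i', 'o', 'u'] then 0 else run + 1 with hr
    by_cases h : best < run'
    · exact le_trans (le_of_lt h) (by simpa [h] using ih run' run')
    · simpa [h] using ih run' best

-- while best < n, 'the final best reaches n' and 'the early-exit scan fires' coincide
theorem pv_best_scan (n : Int) (cs : List Char) : ∀ run best : Int, best < n →
    ((n ≤ bestRun cs run best) ↔ bScan cs n run = true) := by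
  induction cs with
  | nil => intro run best h; simp [bestRun, bScan]; omega
  | cons c rest ih =>
    intro run best h
    simp only [bestRun, bScan]
    set run' := if c ∈ ['a', 'e', 'i', 'o', 'u'] then 0 else run + 1 with hr
    by_cases hn : n ≤ run'
    · have hb : best < run' := by omega
      rw [if_pos hb, if_pos hn]
      simpa using le_trans hn (pv_best_mono rest run' run')
    · rw [if_neg hn]
      by_cases hb : best < run'
      · rw [if_pos hb]; exact ih run' run' (by omega)
      · rw [if_neg hb]; exact ih run' best h

-- one word of the fold: A's body equals B's body
theorem pv_word (s : String) (n count : Int) :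
    (if n ≤ PySem.Str.len s then
      checkInner ((PySem.Str.split?
        (PySem.Str.replace (PySem.Str.replace (PySem.Str.replace (PySem.Str.replace s "e" "a") "i" "a") "o" "a") "u" "a")
        "a").getD []) n count
     else count)
    = (if n ≤ bestRun s.toList 0 0 then count + 1 else count) := by
  set l4 := PySem.Str.replace (PySem.Str.replace (PySem.Str.replace (PySem.Str.replace s "e" "a") "i" "a") "o" "a") "u" "a" with hl4
  have hmask : l4.toList = s.toList.map pvMask := by
    rw [hl4]
    simp only [PySem.Str.toList_replace]
    simp only [show ("e" : String).toList = ['e'] from rfl, show ("i" : String).toList = ['i'] from rfl,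
      show ("o" : String).toList = ['o'] from rfl, show ("u" : String).toList = ['u'] from rfl,
      show ("a" : String).toList = ['a'] from rfl, pv_replace_single, List.map_map]
    exact List.map_congr_left (fun c _ => pv_mask_comp c)
  have htoks : ((PySem.Str.split? l4 "a").getD []).map String.toList = pvSplitA [] (s.toList.map pvMask) := by
    have hch : PySem.Chars.split? l4.toList ['a'] = some (pvSplitA [] (s.toList.map pvMask)) := by
      simp [PySem.Chars.split?, pv_splitOn_eq, hmask]
    have hm := PySem.Str.split?_map l4 "a"
    rw [show ("a" : String).toList = ['a'] from rfl, hch] at hm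
    cases hsp : PySem.Str.split? l4 "a" with
    | none => rw [hsp] at hm; simp at hm
    | some ts => rw [hsp] at hm; simpa using hm
  have hex : (∃ a ∈ (PySem.Str.split? l4 "a").getD [], n ≤ PySem.Str.len a) ↔
      (∃ t ∈ pvSplitA [] (s.toList.map pvMask), n ≤ (t.length : Int)) := by
    rw [← htoks]
    constructor
    · rintro ⟨a, ha, hlen⟩
      exact ⟨a.toList, List.mem_map_of_mem ha, by simpa [PySem.Str.len_eq] using hlen⟩
    · rintro ⟨t, ht, hlen⟩
      rcases List.mem_map.mp ht with ⟨a, ha, rfl⟩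
      exact ⟨a, ha, by simpa [PySem.Str.len_eq] using hlen⟩
  by_cases hn0 : n ≤ (0 : Int)
  · have hlen : n ≤ PySem.Str.len s := by
      rw [PySem.Str.len_eq]
      have : (0 : Int) ≤ s.toList.length := by positivity
      omega
    have hbest : n ≤ bestRun s.toList 0 0 := le_trans hn0 (pv_best_mono s.toList 0 0)
    rcases List.exists_mem_of_ne_nil _ (pv_splitA_ne_nil (s.toList.map pvMask) []) with ⟨t, ht⟩
    have hlt : n ≤ (t.length : Int) := le_trans hn0 (by positivity)
    rw [if_pos hlen, pv_checkInner, if_pos (hex.mpr ⟨t, ht, hlt⟩), if_pos hbest]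
  · have hn1 : 1 ≤ n := by omega
    have hbs : (n ≤ bestRun s.toList 0 0) ↔ bScan s.toList n 0 = true :=
      pv_best_scan n s.toList 0 0 (by omega)
    have hscan : (∃ a ∈ (PySem.Str.split? l4 "a").getD [], n ≤ PySem.Str.len a) ↔ bScan s.toList n 0 = true := by
      rw [hex, pv_tokens_iff n hn1]
      simp only [List.length_nil, Nat.cast_zero]
      rw [pv_scan_mask]
      constructor
      · rintro (h | h)
        · omega
        · exact h
      · exact Or.inr
    by_cases hb : bScan s.toList n 0 = true
    · have hlen : n ≤ PySem.Str.len s := by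
        have := pv_scan_bound (s.toList.map pvMask) n 0 le_rfl (by rw [pv_scan_mask]; exact hb)
        rw [PySem.Str.len_eq]
        simpa using this
      rw [if_pos hlen, pv_checkInner, if_pos (hscan.mpr hb), if_pos (hbs.mpr hb)]
    · rw [if_neg (fun h => hb (hbs.mp h))]
      by_cases hlen : n ≤ PySem.Str.len s
      · rw [if_pos hlen, pv_checkInner, if_neg (fun h => hb (hscan.mp h))]
      · rw [if_neg hlen]

theorem check_spec' (L : List String) (n : Int) : check L n = check_alt L n := by
  unfold check check_alt
  congr 1
  funext count s
  exact pv_word s n count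

-- ===== VERDICT (by name: the statement is the Claim_ definition above) =====
theorem check_spec : Claim_equal_check := by
  intro L n _
  unfold Spec_check
  exact check_spec' L n
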